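-- pv_equiv track=rewrite | github.com/rahmedbuehler/PhilJobsStats | PhilJobsStats.py | coarse_areas
-- ===== SOURCE A (Python) =====
-- def coarse_areas(specific_dict):
-- 	'''
-- 	Expects a dictionary where keys are the specific area and values are the number of occurrences.  Returns a new dictionary with general areas as keys and the number of occurrences as values.
-- 	'''
-- 	coarse = {'Epistemology':0, 'Formal Methods':0, 'Political':0, 'Western History':0, 'Non-Western History':0, 'Ethics':0, 'Language':0, 'Science':0, 'Mind':0, 'Aesthetics':0, 'Technology':0, 'Metaphysics':0, 'Religion':0, 'Social':0}
-- 	for k,v in specific_dict.items():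
-- 		if k=='Epistemology' or k=='Formal Epistemology':
-- 			coarse['Epistemology']+=v
-- 		elif k=='Formal Methods' or k=='Logic' or k=='Decision' or	k=='Math' or k=='Game' or k=='Statistics' or k=='Set Theory' or k=='Category Theory' or k=='Social Choice' or k=='Critical Thinking':
-- 			coarse['Formal Methods']+=v
-- 		elif k=='Political' or k=='Law':
-- 			coarse['Political']+=v
-- 		elif k=='Western History' or k=='Ancient' or k=='History of Philosophy' or k=='Modern' or k=='Continental' or k=='Analytic' or k=='Medieval' or k=='Kant' or k=='Ancient' or k=='20th Century' or k=='19th Century' or k=='18th Century' or k=='17th Century' or k=='16th Century' or k=='German' or k=='Pragmatism' or k=='American' or k=='European' or k=='Marx' or k=='French' or k=='Western Philosophy':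
-- 			coarse['Western History']+=v
-- 		elif k=='Non-Western History' or k=='Asian' or k=='Chinese' or k=='African' or k=='Latin' or k=='Native American' or k=='Indian' or k=='Non-Western' or k=='Arabic' or k=='Japanese':
-- 			coarse['Non-Western History']+=v
-- 		elif k=='Ethics' or k=='Applied Ethics' or k=='Business Ethics' or k=='Metaethics' or k=='Bioethics' or k=='Public Policy' or k=='Value Theory':
-- 			coarse['Ethics']+=v
-- 		elif k=='Language' or k=='Linguistics':
-- 			coarse['Language']+=v
-- 		elif k=='Science' or k=='Cognitive' or k=='Physics' or k=='Biology' or k=='Neuro' or k=='Economic':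
-- 			coarse['Science']+=v
-- 		elif k=='Mind' or k=='Moral Psych' or k=='Perception' or k=='Psychology' or k=='Phenomenology':
-- 			coarse['Mind']+=v
-- 		elif k=='Aesthetics':
-- 			coarse['Aesthetics']+=v
-- 		elif k=='Technology' or k=='AI' or k=='Data Science':
-- 			coarse['Technology']+=v
-- 		elif k=='Metaphysics':
-- 			coarse['Metaphysics']+=v
-- 		elif k=='Religion' or k=='Buddhist' or k=='Jewish'  or k=='Islam' or k=='Catholic' or k=='Theology':
-- 			coarse['Religion']+=v
-- 		elif k=='Social' or k=='Race' or k=='Feminist' or k=='Gender':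
-- 			coarse['Social']+=v
-- 	return coarse
-- ===== SOURCE B (Python) =====
-- CATEGORIES = {
--     'Epistemology': ['Epistemology', 'Formal Epistemology'],
--     'Formal Methods': ['Formal Methods', 'Logic', 'Decision', 'Math', 'Game', 'Statistics', 'Set Theory', 'Category Theory', 'Social Choice', 'Critical Thinking'],
--     'Political': ['Political', 'Law'],
--     'Western History': ['Western History', 'Ancient', 'History of Philosophy', 'Modern', 'Continental', 'Analytic', 'Medieval', 'Kant', '20th Century', '19th Century', '18th Century', '17th Century', '16th Century', 'German', 'Pragmatism', 'American', 'European', 'Marx', 'French', 'Western Philosophy'],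
--     'Non-Western History': ['Non-Western History', 'Asian', 'Chinese', 'African', 'Latin', 'Native American', 'Indian', 'Non-Western', 'Arabic', 'Japanese'],
--     'Ethics': ['Ethics', 'Applied Ethics', 'Business Ethics', 'Metaethics', 'Bioethics', 'Public Policy', 'Value Theory'],
--     'Language': ['Language', 'Linguistics'],
--     'Science': ['Science', 'Cognitive', 'Physics', 'Biology', 'Neuro', 'Economic'],
--     'Mind': ['Mind', 'Moral Psych', 'Perception', 'Psychology', 'Phenomenology'],
--     'Aesthetics': ['Aesthetics'],
--     'Technology': ['Technology', 'AI', 'Data Science'],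
--     'Metaphysics': ['Metaphysics'],
--     'Religion': ['Religion', 'Buddhist', 'Jewish', 'Islam', 'Catholic', 'Theology'],
--     'Social': ['Social', 'Race', 'Feminist', 'Gender'],
-- }
--
-- def coarse_areas(specific_dict):
--     return {cat: sum(specific_dict.get(area, 0) for area in areas)
--             for cat, areas in CATEGORIES.items()}
-- ===== Notes on version B (the rewrite author's own statement) =====
-- stated objective: simpler
-- what changed: Instead of scanning the input keys through a 14-arm elif comparison chain that increments buckets, B stores the bucket memberships as a CATEGORIES table and builds the result in one dict comprehension, summing get-lookups of each category's member areas.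
import Mathlib
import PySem

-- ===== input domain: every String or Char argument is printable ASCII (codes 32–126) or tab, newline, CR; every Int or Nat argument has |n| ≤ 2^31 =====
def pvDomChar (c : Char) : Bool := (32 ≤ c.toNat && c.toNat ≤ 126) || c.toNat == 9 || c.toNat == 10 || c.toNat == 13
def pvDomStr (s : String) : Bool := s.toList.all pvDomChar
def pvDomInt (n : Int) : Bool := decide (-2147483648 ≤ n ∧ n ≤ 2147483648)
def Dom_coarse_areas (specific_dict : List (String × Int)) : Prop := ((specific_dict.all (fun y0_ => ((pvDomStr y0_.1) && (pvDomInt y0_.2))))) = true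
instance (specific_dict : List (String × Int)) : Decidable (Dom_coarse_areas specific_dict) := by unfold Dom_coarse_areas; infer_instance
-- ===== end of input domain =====

-- B replaces A's 14-arm elif comparison chain over the input keys by a CATEGORIES
-- table looped over with get-lookups (objective: simpler decomposition; same results).
-- ===== PORT A =====
def coarseStep (coarse : PySem.Dict String Int) (k : String) (v : Int) : PySem.Dict String Int :=
  if k == "Epistemology" || k == "Formal Epistemology" then coarse.modify "Epistemology" 0 (· + v)
  else if k == "Formal Methods" || k == "Logic" || k == "Decision" || k == "Math" || k == "Game" || k == "Statistics" || k == "Set Theory" || k == "Category Theory" || k == "Social Choice" || k == "Critical Thinking" then coarse.modify "Formal Methods" 0 (· + v)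
  else if k == "Political" || k == "Law" then coarse.modify "Political" 0 (· + v)
  else if k == "Western History" || k == "Ancient" || k == "History of Philosophy" || k == "Modern" || k == "Continental" || k == "Analytic" || k == "Medieval" || k == "Kant" || k == "Ancient" || k == "20th Century" || k == "19th Century" || k == "18th Century" || k == "17th Century" || k == "16th Century" || k == "German" || k == "Pragmatism" || k == "American" || k == "European" || k == "Marx" || k == "French" || k == "Western Philosophy" then coarse.modify "Western History" 0 (· + v)
  else if k == "Non-Western History" || k == "Asian" || k == "Chinese" || k == "African" || k == "Latin" || k == "Native American" || k == "Indian" || k == "Non-Western" || k == "Arabic" || k == "Japanese" then coarse.modify "Non-Western History" 0 (· + v)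
  else if k == "Ethics" || k == "Applied Ethics" || k == "Business Ethics" || k == "Metaethics" || k == "Bioethics" || k == "Public Policy" || k == "Value Theory" then coarse.modify "Ethics" 0 (· + v)
  else if k == "Language" || k == "Linguistics" then coarse.modify "Language" 0 (· + v)
  else if k == "Science" || k == "Cognitive" || k == "Physics" || k == "Biology" || k == "Neuro" || k == "Economic" then coarse.modify "Science" 0 (· + v)
  else if k == "Mind" || k == "Moral Psych" || k == "Perception" || k == "Psychology" || k == "Phenomenology" then coarse.modify "Mind" 0 (· + v)
  else if k == "Aesthetics" then coarse.modify "Aesthetics" 0 (· + v)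
  else if k == "Technology" || k == "AI" || k == "Data Science" then coarse.modify "Technology" 0 (· + v)
  else if k == "Metaphysics" then coarse.modify "Metaphysics" 0 (· + v)
  else if k == "Religion" || k == "Buddhist" || k == "Jewish" || k == "Islam" || k == "Catholic" || k == "Theology" then coarse.modify "Religion" 0 (· + v)
  else if k == "Social" || k == "Race" || k == "Feminist" || k == "Gender" then coarse.modify "Social" 0 (· + v)
  else coarse

def coarse_areas (specific_dict : List (String × Int)) : List (String × Int) :=
  (specific_dict.foldl (fun c kv => coarseStep c kv.1 kv.2) (PySem.Dict.mk [("Epistemology", 0), ("Formal Methods", 0), ("Political", 0), ("Western History", 0), ("Non-Western History", 0), ("Ethics", 0), ("Language", 0), ("Science", 0), ("Mind", 0), ("Aesthetics", 0), ("Technology", 0), ("Metaphysics", 0), ("Religion", 0), ("Social", 0)])).items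

-- ===== PORT B =====
def pvCATEGORIES : List (String × List String) :=
  [("Epistemology", ["Epistemology", "Formal Epistemology"]),
   ("Formal Methods", ["Formal Methods", "Logic", "Decision", "Math", "Game", "Statistics", "Set Theory", "Category Theory", "Social Choice", "Critical Thinking"]),
   ("Political", ["Political", "Law"]),
   ("Western History", ["Western History", "Ancient", "History of Philosophy", "Modern", "Continental", "Analytic", "Medieval", "Kant", "20th Century", "19th Century", "18th Century", "17th Century", "16th Century", "German", "Pragmatism", "American", "European", "Marx", "French", "Western Philosophy"]),
   ("Non-Western History", ["Non-Western History", "Asian", "Chinese", "African", "Latin", "Native American", "Indian", "Non-Western", "Arabic", "Japanese"]),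
   ("Ethics", ["Ethics", "Applied Ethics", "Business Ethics", "Metaethics", "Bioethics", "Public Policy", "Value Theory"]),
   ("Language", ["Language", "Linguistics"]),
   ("Science", ["Science", "Cognitive", "Physics", "Biology", "Neuro", "Economic"]),
   ("Mind", ["Mind", "Moral Psych", "Perception", "Psychology", "Phenomenology"]),
   ("Aesthetics", ["Aesthetics"]),
   ("Technology", ["Technology", "AI", "Data Science"]),
   ("Metaphysics", ["Metaphysics"]),
   ("Religion", ["Religion", "Buddhist", "Jewish", "Islam", "Catholic", "Theology"]),
   ("Social", ["Social", "Race", "Feminist", "Gender"])]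

def coarse_areas_alt (specific_dict : List (String × Int)) : List (String × Int) :=
  pvCATEGORIES.map (fun p => (p.1, (p.2.map (fun area => (PySem.Dict.mk specific_dict).getD area 0)).sum))

-- ===== PRECONDITION & SPEC =====
-- The Python argument is a dict, whose keys are necessarily distinct; Pre_ only excludes
-- association lists with duplicate keys, which no Python dict can produce (B's first-match
-- get-lookup and A's full scan could disagree on such lists).
def Pre_coarse_areas (specific_dict : List (String × Int)) : Prop :=
  (specific_dict.map Prod.fst).Nodup
instance (specific_dict : List (String × Int)) : Decidable (Pre_coarse_areas specific_dict) := by unfold Pre_coarse_areas; infer_instance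
def pvWitness_coarse_areas : (List (String × Int)) := [("Logic", 3), ("zzz", 1)]

def Spec_coarse_areas (specific_dict : List (String × Int)) (out : List (String × Int)) : Prop := out = coarse_areas_alt specific_dict
instance (specific_dict : List (String × Int)) (out : List (String × Int)) : Decidable (Spec_coarse_areas specific_dict out) := by unfold Spec_coarse_areas; infer_instance

-- ===== CLAIM (what is proved, stated in full; the proofs are below) =====
def Claim_equal_coarse_areas : Prop := ∀ (specific_dict : List (String × Int)), Dom_coarse_areas specific_dict → Pre_coarse_areas specific_dict → Spec_coarse_areas specific_dict (coarse_areas specific_dict)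

-- ===== LEMMAS AND PROOFS =====
-- total weight of the input entries whose key belongs to ms
def pvT (ms : List String) (d : List (String × Int)) : Int :=
  ((d.filter (fun kv => decide (kv.1 ∈ ms))).map Prod.snd).sum

theorem pvT_cons (ms : List String) (k : String) (v : Int) (t : List (String × Int)) :
    pvT ms ((k, v) :: t) = (if k ∈ ms then v else 0) + pvT ms t := by
  by_cases h : k ∈ ms <;> simp [pvT, h]

theorem pvModify1 (v n1 n2 n3 n4 n5 n6 n7 n8 n9 n10 n11 n12 n13 n14 : Int) :
    (PySem.Dict.mk [("Epistemology", n1), ("Formal Methods", n2), ("Political", n3), ("Western History", n4), ("Non-Western History", n5), ("Ethics", n6), ("Language", n7), ("Science", n8), ("Mind", n9), ("Aesthetics", n10), ("Technology", n11), ("Metaphysics", n12), ("Religion", n13), ("Social", n14)]).modify "Epistemology" 0 (· + v) = PySem.Dict.mk [("Epistemology", n1 + v), ("Formal Methods", n2), ("Political", n3), ("Western History", n4), ("Non-Western History", n5), ("Ethics", n6), ("Language", n7), ("Science", n8), ("Mind", n9), ("Aesthetics", n10), ("Technology", n11), ("Metaphysics", n12), ("Religion", n13), ("Social", n14)] :=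 by
  simp [PySem.Dict.modify, PySem.Dict.insert, PySem.Dict.getD, PySem.Dict.get?, PySem.Dict.contains]

theorem pvModify2 (v n1 n2 n3 n4 n5 n6 n7 n8 n9 n10 n11 n12 n13 n14 : Int) :
    (PySem.Dict.mk [("Epistemology", n1), ("Formal Methods", n2), ("Political", n3), ("Western History", n4), ("Non-Western History", n5), ("Ethics", n6), ("Language", n7), ("Science", n8), ("Mind", n9), ("Aesthetics", n10), ("Technology", n11), ("Metaphysics", n12), ("Religion", n13), ("Social", n14)]).modify "Formal Methods" 0 (· + v) = PySem.Dict.mk [("Epistemology", n1), ("Formal Methods", n2 + v), ("Political", n3), ("Western History", n4), ("Non-Western History", n5), ("Ethics", n6), ("Language", n7), ("Science", n8), ("Mind", n9), ("Aesthetics", n10), ("Technology", n11), ("Metaphysics", n12), ("Religion", n13), ("Social", n14)] := by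
  simp [PySem.Dict.modify, PySem.Dict.insert, PySem.Dict.getD, PySem.Dict.get?, PySem.Dict.contains]

theorem pvModify3 (v n1 n2 n3 n4 n5 n6 n7 n8 n9 n10 n11 n12 n13 n14 : Int) :
    (PySem.Dict.mk [("Epistemology", n1), ("Formal Methods", n2), ("Political", n3), ("Western History", n4), ("Non-Western History", n5), ("Ethics", n6), ("Language", n7), ("Science", n8), ("Mind", n9), ("Aesthetics", n10), ("Technology", n11), ("Metaphysics", n12), ("Religion", n13), ("Social", n14)]).modify "Political" 0 (· + v) = PySem.Dict.mk [("Epistemology", n1), ("Formal Methods", n2), ("Political", n3 + v), ("Western History", n4), ("Non-Western History", n5), ("Ethics", n6), ("Language", n7), ("Science", n8), ("Mind", n9), ("Aesthetics", n10), ("Technology", n11), ("Metaphysics", n12), ("Religion", n13), ("Social", n14)] := by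
  simp [PySem.Dict.modify, PySem.Dict.insert, PySem.Dict.getD, PySem.Dict.get?, PySem.Dict.contains]

theorem pvModify4 (v n1 n2 n3 n4 n5 n6 n7 n8 n9 n10 n11 n12 n13 n14 : Int) :
    (PySem.Dict.mk [("Epistemology", n1), ("Formal Methods", n2), ("Political", n3), ("Western History", n4), ("Non-Western History", n5), ("Ethics", n6), ("Language", n7), ("Science", n8), ("Mind", n9), ("Aesthetics", n10), ("Technology", n11), ("Metaphysics", n12), ("Religion", n13), ("Social", n14)]).modify "Western History" 0 (· + v) = PySem.Dict.mk [("Epistemology", n1), ("Formal Methods", n2), ("Political", n3), ("Western History", n4 + v), ("Non-Western History", n5), ("Ethics", n6), ("Language", n7), ("Science", n8), ("Mind", n9), ("Aesthetics", n10), ("Technology", n11), ("Metaphysics", n12), ("Religion", n13), ("Social", n14)] := by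
  simp [PySem.Dict.modify, PySem.Dict.insert, PySem.Dict.getD, PySem.Dict.get?, PySem.Dict.contains]

theorem pvModify5 (v n1 n2 n3 n4 n5 n6 n7 n8 n9 n10 n11 n12 n13 n14 : Int) :
    (PySem.Dict.mk [("Epistemology", n1), ("Formal Methods", n2), ("Political", n3), ("Western History", n4), ("Non-Western History", n5), ("Ethics", n6), ("Language", n7), ("Science", n8), ("Mind", n9), ("Aesthetics", n10), ("Technology", n11), ("Metaphysics", n12), ("Religion", n13), ("Social", n14)]).modify "Non-Western History" 0 (· + v) = PySem.Dict.mk [("Epistemology", n1), ("Formal Methods", n2), ("Political", n3), ("Western History", n4), ("Non-Western History", n5 + v), ("Ethics", n6), ("Language", n7), ("Science", n8), ("Mind", n9), ("Aesthetics", n10), ("Technology", n11), ("Metaphysics", n12), ("Religion", n13), ("Social", n14)] := by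
  simp [PySem.Dict.modify, PySem.Dict.insert, PySem.Dict.getD, PySem.Dict.get?, PySem.Dict.contains]

theorem pvModify6 (v n1 n2 n3 n4 n5 n6 n7 n8 n9 n10 n11 n12 n13 n14 : Int) :
    (PySem.Dict.mk [("Epistemology", n1), ("Formal Methods", n2), ("Political", n3), ("Western History", n4), ("Non-Western History", n5), ("Ethics", n6), ("Language", n7), ("Science", n8), ("Mind", n9), ("Aesthetics", n10), ("Technology", n11), ("Metaphysics", n12), ("Religion", n13), ("Social", n14)]).modify "Ethics" 0 (· + v) = PySem.Dict.mk [("Epistemology", n1), ("Formal Methods", n2), ("Political", n3), ("Western History", n4), ("Non-Western History", n5), ("Ethics", n6 + v), ("Language", n7), ("Science", n8), ("Mind", n9), ("Aesthetics", n10), ("Technology", n11), ("Metaphysics", n12), ("Religion", n13), ("Social", n14)] := by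
  simp [PySem.Dict.modify, PySem.Dict.insert, PySem.Dict.getD, PySem.Dict.get?, PySem.Dict.contains]

theorem pvModify7 (v n1 n2 n3 n4 n5 n6 n7 n8 n9 n10 n11 n12 n13 n14 : Int) :
    (PySem.Dict.mk [("Epistemology", n1), ("Formal Methods", n2), ("Political", n3), ("Western History", n4), ("Non-Western History", n5), ("Ethics", n6), ("Language", n7), ("Science", n8), ("Mind", n9), ("Aesthetics", n10), ("Technology", n11), ("Metaphysics", n12), ("Religion", n13), ("Social", n14)]).modify "Language" 0 (· + v) = PySem.Dict.mk [("Epistemology", n1), ("Formal Methods", n2), ("Political", n3), ("Western History", n4), ("Non-Western History", n5), ("Ethics", n6), ("Language", n7 + v), ("Science", n8), ("Mind", n9), ("Aesthetics", n10), ("Technology", n11), ("Metaphysics", n12), ("Religion", n13), ("Social", n14)] := by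
  simp [PySem.Dict.modify, PySem.Dict.insert, PySem.Dict.getD, PySem.Dict.get?, PySem.Dict.contains]

theorem pvModify8 (v n1 n2 n3 n4 n5 n6 n7 n8 n9 n10 n11 n12 n13 n14 : Int) :
    (PySem.Dict.mk [("Epistemology", n1), ("Formal Methods", n2), ("Political", n3), ("Western History", n4), ("Non-Western History", n5), ("Ethics", n6), ("Language", n7), ("Science", n8), ("Mind", n9), ("Aesthetics", n10), ("Technology", n11), ("Metaphysics", n12), ("Religion", n13), ("Social", n14)]).modify "Science" 0 (· + v) = PySem.Dict.mk [("Epistemology", n1), ("Formal Methods", n2), ("Political", n3), ("Western History", n4), ("Non-Western History", n5), ("Ethics", n6), ("Language", n7), ("Science", n8 + v), ("Mind", n9), ("Aesthetics", n10), ("Technology", n11), ("Metaphysics", n12), ("Religion", n13), ("Social", n14)] := by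
  simp [PySem.Dict.modify, PySem.Dict.insert, PySem.Dict.getD, PySem.Dict.get?, PySem.Dict.contains]

theorem pvModify9 (v n1 n2 n3 n4 n5 n6 n7 n8 n9 n10 n11 n12 n13 n14 : Int) :
    (PySem.Dict.mk [("Epistemology", n1), ("Formal Methods", n2), ("Political", n3), ("Western History", n4), ("Non-Western History", n5), ("Ethics", n6), ("Language", n7), ("Science", n8), ("Mind", n9), ("Aesthetics", n10), ("Technology", n11), ("Metaphysics", n12), ("Religion", n13), ("Social", n14)]).modify "Mind" 0 (· + v) = PySem.Dict.mk [("Epistemology", n1), ("Formal Methods", n2), ("Political", n3), ("Western History", n4), ("Non-Western History", n5), ("Ethics", n6), ("Language", n7), ("Science", n8), ("Mind", n9 + v), ("Aesthetics", n10), ("Technology", n11), ("Metaphysics", n12), ("Religion", n13), ("Social", n14)] := by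
  simp [PySem.Dict.modify, PySem.Dict.insert, PySem.Dict.getD, PySem.Dict.get?, PySem.Dict.contains]

theorem pvModify10 (v n1 n2 n3 n4 n5 n6 n7 n8 n9 n10 n11 n12 n13 n14 : Int) :
    (PySem.Dict.mk [("Epistemology", n1), ("Formal Methods", n2), ("Political", n3), ("Western History", n4), ("Non-Western History", n5), ("Ethics", n6), ("Language", n7), ("Science", n8), ("Mind", n9), ("Aesthetics", n10), ("Technology", n11), ("Metaphysics", n12), ("Religion", n13), ("Social", n14)]).modify "Aesthetics" 0 (· + v) = PySem.Dict.mk [("Epistemology", n1), ("Formal Methods", n2), ("Political", n3), ("Western History", n4), ("Non-Western History", n5), ("Ethics", n6), ("Language", n7), ("Science", n8), ("Mind", n9), ("Aesthetics", n10 + v), ("Technology", n11), ("Metaphysics", n12), ("Religion", n13), ("Social", n14)] := by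
  simp [PySem.Dict.modify, PySem.Dict.insert, PySem.Dict.getD, PySem.Dict.get?, PySem.Dict.contains]

theorem pvModify11 (v n1 n2 n3 n4 n5 n6 n7 n8 n9 n10 n11 n12 n13 n14 : Int) :
    (PySem.Dict.mk [("Epistemology", n1), ("Formal Methods", n2), ("Political", n3), ("Western History", n4), ("Non-Western History", n5), ("Ethics", n6), ("Language", n7), ("Science", n8), ("Mind", n9), ("Aesthetics", n10), ("Technology", n11), ("Metaphysics", n12), ("Religion", n13), ("Social", n14)]).modify "Technology" 0 (· + v) = PySem.Dict.mk [("Epistemology", n1), ("Formal Methods", n2), ("Political", n3), ("Western History", n4), ("Non-Western History", n5), ("Ethics", n6), ("Language", n7), ("Science", n8), ("Mind", n9), ("Aesthetics", n10), ("Technology", n11 + v), ("Metaphysics", n12), ("Religion", n13), ("Social", n14)] := by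
  simp [PySem.Dict.modify, PySem.Dict.insert, PySem.Dict.getD, PySem.Dict.get?, PySem.Dict.contains]

theorem pvModify12 (v n1 n2 n3 n4 n5 n6 n7 n8 n9 n10 n11 n12 n13 n14 : Int) :
    (PySem.Dict.mk [("Epistemology", n1), ("Formal Methods", n2), ("Political", n3), ("Western History", n4), ("Non-Western History", n5), ("Ethics", n6), ("Language", n7), ("Science", n8), ("Mind", n9), ("Aesthetics", n10), ("Technology", n11), ("Metaphysics", n12), ("Religion", n13), ("Social", n14)]).modify "Metaphysics" 0 (· + v) = PySem.Dict.mk [("Epistemology", n1), ("Formal Methods", n2), ("Political", n3), ("Western History", n4), ("Non-Western History", n5), ("Ethics", n6), ("Language", n7), ("Science", n8), ("Mind", n9), ("Aesthetics", n10), ("Technology", n11), ("Metaphysics", n12 + v), ("Religion", n13), ("Social", n14)] := by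
  simp [PySem.Dict.modify, PySem.Dict.insert, PySem.Dict.getD, PySem.Dict.get?, PySem.Dict.contains]

theorem pvModify13 (v n1 n2 n3 n4 n5 n6 n7 n8 n9 n10 n11 n12 n13 n14 : Int) :
    (PySem.Dict.mk [("Epistemology", n1), ("Formal Methods", n2), ("Political", n3), ("Western History", n4), ("Non-Western History", n5), ("Ethics", n6), ("Language", n7), ("Science", n8), ("Mind", n9), ("Aesthetics", n10), ("Technology", n11), ("Metaphysics", n12), ("Religion", n13), ("Social", n14)]).modify "Religion" 0 (· + v) = PySem.Dict.mk [("Epistemology", n1), ("Formal Methods", n2), ("Political", n3), ("Western History", n4), ("Non-Western History", n5), ("Ethics", n6), ("Language", n7), ("Science", n8), ("Mind", n9), ("Aesthetics", n10), ("Technology", n11), ("Metaphysics", n12), ("Religion", n13 + v), ("Social", n14)] := by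
  simp [PySem.Dict.modify, PySem.Dict.insert, PySem.Dict.getD, PySem.Dict.get?, PySem.Dict.contains]

theorem pvModify14 (v n1 n2 n3 n4 n5 n6 n7 n8 n9 n10 n11 n12 n13 n14 : Int) :
    (PySem.Dict.mk [("Epistemology", n1), ("Formal Methods", n2), ("Political", n3), ("Western History", n4), ("Non-Western History", n5), ("Ethics", n6), ("Language", n7), ("Science", n8), ("Mind", n9), ("Aesthetics", n10), ("Technology", n11), ("Metaphysics", n12), ("Religion", n13), ("Social", n14)]).modify "Social" 0 (· + v) = PySem.Dict.mk [("Epistemology", n1), ("Formal Methods", n2), ("Political", n3), ("Western History", n4), ("Non-Western History", n5), ("Ethics", n6), ("Language", n7), ("Science", n8), ("Mind", n9), ("Aesthetics", n10), ("Technology", n11), ("Metaphysics", n12), ("Religion", n13), ("Social", n14 + v)] := by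
  simp [PySem.Dict.modify, PySem.Dict.insert, PySem.Dict.getD, PySem.Dict.get?, PySem.Dict.contains]

set_option maxHeartbeats 2000000 in
theorem pvStep_eq (k : String) (v : Int) (n1 n2 n3 n4 n5 n6 n7 n8 n9 n10 n11 n12 n13 n14 : Int) :
    coarseStep (PySem.Dict.mk [("Epistemology", n1), ("Formal Methods", n2), ("Political", n3), ("Western History", n4), ("Non-Western History", n5), ("Ethics", n6), ("Language", n7), ("Science", n8), ("Mind", n9), ("Aesthetics", n10), ("Technology", n11), ("Metaphysics", n12), ("Religion", n13), ("Social", n14)]) k v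
      = PySem.Dict.mk [("Epistemology", n1 + (if k ∈ ["Epistemology", "Formal Epistemology"] then v else 0)), ("Formal Methods", n2 + (if k ∈ ["Formal Methods", "Logic", "Decision", "Math", "Game", "Statistics", "Set Theory", "Category Theory", "Social Choice", "Critical Thinking"] then v else 0)), ("Political", n3 + (if k ∈ ["Political", "Law"] then v else 0)), ("Western History", n4 + (if k ∈ ["Western History", "Ancient", "History of Philosophy", "Modern", "Continental", "Analytic", "Medieval", "Kant", "20th Century", "19th Century", "18th Century", "17th Century", "16th Century", "German", "Pragmatism", "American", "European", "Marx", "French", "Western Philosophy"] then v else 0)), ("Non-Western History", n5 + (if k ∈ ["Non-Western History", "Asian", "Chinese", "African", "Latin", "Native American", "Indian", "Non-Western", "Arabic", "Japanese"] then v else 0)), ("Ethics", n6 + (if k ∈ ["Ethics", "Applied Ethics", "Business Ethics", "Metaethics", "Bioethics", "Public Policy", "Value Theory"] then v else 0)), ("Language", n7 + (if k ∈ ["Language", "Linguistics"] then v else 0)), ("Science", n8 + (if k ∈ ["Science", "Cognitive", "Physics", "Biology", "Neuro", "Economic"] then v else 0)), ("Mind", n9 + (if k ∈ ["Mind", "Moral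 Psych", "Perception", "Psychology", "Phenomenology"] then v else 0)), ("Aesthetics", n10 + (if k ∈ ["Aesthetics"] then v else 0)), ("Technology", n11 + (if k ∈ ["Technology", "AI", "Data Science"] then v else 0)), ("Metaphysics", n12 + (if k ∈ ["Metaphysics"] then v else 0)), ("Religion", n13 + (if k ∈ ["Religion", "Buddhist", "Jewish", "Islam", "Catholic", "Theology"] then v else 0)), ("Social", n14 + (if k ∈ ["Social", "Race", "Feminist", "Gender"] then v else 0))] := by
  rw [coarseStep]
  by_cases h1 : (k == "Epistemology" || k == "Formal Epistemology") = true
  · rw [if_pos h1, pvModify1 v n1 n2 n3 n4 n5 n6 n7 n8 n9 n10 n11 n12 n13 n14]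
    simp only [Bool.or_eq_true, beq_iff_eq] at h1
    rcases h1 with rfl|rfl <;> simp
  · rw [if_neg h1]
    by_cases h2 : (k == "Formal Methods" || k == "Logic" || k == "Decision" || k == "Math" || k == "Game" || k == "Statistics" || k == "Set Theory" || k == "Category Theory" || k == "Social Choice" || k == "Critical Thinking") = true
    · rw [if_pos h2, pvModify2 v n1 n2 n3 n4 n5 n6 n7 n8 n9 n10 n11 n12 n13 n14]
      simp only [Bool.or_eq_true, beq_iff_eq, or_assoc] at h2
      rcases h2 with rfl|rfl|rfl|rfl|rfl|rfl|rfl|rfl|rfl|rfl <;> simp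
    · rw [if_neg h2]
      by_cases h3 : (k == "Political" || k == "Law") = true
      · rw [if_pos h3, pvModify3 v n1 n2 n3 n4 n5 n6 n7 n8 n9 n10 n11 n12 n13 n14]
        simp only [Bool.or_eq_true, beq_iff_eq] at h3
        rcases h3 with rfl|rfl <;> simp
      · rw [if_neg h3]
        by_cases h4 : (k == "Western History" || k == "Ancient" || k == "History of Philosophy" || k == "Modern" || k == "Continental" || k == "Analytic" || k == "Medieval" || k == "Kant" || k == "Ancient" || k == "20th Century" || k == "19th Century" || k == "18th Century" || k == "17th Century" || k == "16th Century" || k == "German" || k == "Pragmatism" || k == "American" || k == "European" || k == "Marx" || k == "French" || k == "Western Philosophy") = true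
        · rw [if_pos h4, pvModify4 v n1 n2 n3 n4 n5 n6 n7 n8 n9 n10 n11 n12 n13 n14]
          simp only [Bool.or_eq_true, beq_iff_eq, or_assoc] at h4
          rcases h4 with rfl|rfl|rfl|rfl|rfl|rfl|rfl|rfl|rfl|rfl|rfl|rfl|rfl|rfl|rfl|rfl|rfl|rfl|rfl|rfl|rfl <;> simp
        · rw [if_neg h4]
          by_cases h5 : (k == "Non-Western History" || k == "Asian" || k == "Chinese" || k == "African" || k == "Latin" || k == "Native American" || k == "Indian" || k == "Non-Western" || k == "Arabic" || k == "Japanese") = true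
          · rw [if_pos h5, pvModify5 v n1 n2 n3 n4 n5 n6 n7 n8 n9 n10 n11 n12 n13 n14]
            simp only [Bool.or_eq_true, beq_iff_eq, or_assoc] at h5
            rcases h5 with rfl|rfl|rfl|rfl|rfl|rfl|rfl|rfl|rfl|rfl <;> simp
          · rw [if_neg h5]
            by_cases h6 : (k == "Ethics" || k == "Applied Ethics" || k == "Business Ethics" || k == "Metaethics" || k == "Bioethics" || k == "Public Policy" || k == "Value Theory") = true
            · rw [if_pos h6, pvModify6 v n1 n2 n3 n4 n5 n6 n7 n8 n9 n10 n11 n12 n13 n14]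
              simp only [Bool.or_eq_true, beq_iff_eq, or_assoc] at h6
              rcases h6 with rfl|rfl|rfl|rfl|rfl|rfl|rfl <;> simp
            · rw [if_neg h6]
              by_cases h7 : (k == "Language" || k == "Linguistics") = true
              · rw [if_pos h7, pvModify7 v n1 n2 n3 n4 n5 n6 n7 n8 n9 n10 n11 n12 n13 n14]
                simp only [Bool.or_eq_true, beq_iff_eq] at h7
                rcases h7 with rfl|rfl <;> simp
              · rw [if_neg h7]
                by_cases h8 : (k == "Science" || k == "Cognitive" || k == "Physics" || k == "Biology" || k == "Neuro" || k == "Economic") = true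
                · rw [if_pos h8, pvModify8 v n1 n2 n3 n4 n5 n6 n7 n8 n9 n10 n11 n12 n13 n14]
                  simp only [Bool.or_eq_true, beq_iff_eq, or_assoc] at h8
                  rcases h8 with rfl|rfl|rfl|rfl|rfl|rfl <;> simp
                · rw [if_neg h8]
                  by_cases h9 : (k == "Mind" || k == "Moral Psych" || k == "Perception" || k == "Psychology" || k == "Phenomenology") = true
                  · rw [if_pos h9, pvModify9 v n1 n2 n3 n4 n5 n6 n7 n8 n9 n10 n11 n12 n13 n14]
                    simp only [Bool.or_eq_true, beq_iff_eq, or_assoc] at h9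
                    rcases h9 with rfl|rfl|rfl|rfl|rfl <;> simp
                  · rw [if_neg h9]
                    by_cases h10 : (k == "Aesthetics") = true
                    · rw [if_pos h10, pvModify10 v n1 n2 n3 n4 n5 n6 n7 n8 n9 n10 n11 n12 n13 n14]
                      simp only [beq_iff_eq] at h10
                      subst h10
                      simp
                    · rw [if_neg h10]
                      by_cases h11 : (k == "Technology" || k == "AI" || k == "Data Science") = true
                      · rw [if_pos h11, pvModify11 v n1 n2 n3 n4 n5 n6 n7 n8 n9 n10 n11 n12 n13 n14]
                        simp only [Bool.or_eq_true, beq_iff_eq, or_assoc] at h11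
                        rcases h11 with rfl|rfl|rfl <;> simp
                      · rw [if_neg h11]
                        by_cases h12 : (k == "Metaphysics") = true
                        · rw [if_pos h12, pvModify12 v n1 n2 n3 n4 n5 n6 n7 n8 n9 n10 n11 n12 n13 n14]
                          simp only [beq_iff_eq] at h12
                          subst h12
                          simp
                        · rw [if_neg h12]
                          by_cases h13 : (k == "Religion" || k == "Buddhist" || k == "Jewish" || k == "Islam" || k == "Catholic" || k == "Theology") = true
                          · rw [if_pos h13, pvModify13 v n1 n2 n3 n4 n5 n6 n7 n8 n9 n10 n11 n12 n13 n14]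
                            simp only [Bool.or_eq_true, beq_iff_eq, or_assoc] at h13
                            rcases h13 with rfl|rfl|rfl|rfl|rfl|rfl <;> simp
                          · rw [if_neg h13]
                            by_cases h14 : (k == "Social" || k == "Race" || k == "Feminist" || k == "Gender") = true
                            · rw [if_pos h14, pvModify14 v n1 n2 n3 n4 n5 n6 n7 n8 n9 n10 n11 n12 n13 n14]
                              simp only [Bool.or_eq_true, beq_iff_eq, or_assoc] at h14
                              rcases h14 with rfl|rfl|rfl|rfl <;> simp
                            · rw [if_neg h14]
                              simp only [Bool.or_eq_true, beq_iff_eq, not_or] at h1 h2 h3 h4 h5 h6 h7 h8 h9 h10 h11 h12 h13 h14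
                              simp [h1, h2, h3, h4, h5, h6, h7, h8, h9, h10, h11, h12, h13, h14, List.mem_cons]

theorem pvLoop_eq (specific_dict : List (String × Int)) :
    ∀ (n1 n2 n3 n4 n5 n6 n7 n8 n9 n10 n11 n12 n13 n14 : Int),
      specific_dict.foldl (fun c kv => coarseStep c kv.1 kv.2) (PySem.Dict.mk [("Epistemology", n1), ("Formal Methods", n2), ("Political", n3), ("Western History", n4), ("Non-Western History", n5), ("Ethics", n6), ("Language", n7), ("Science", n8), ("Mind", n9), ("Aesthetics", n10), ("Technology", n11), ("Metaphysics", n12), ("Religion", n13), ("Social", n14)])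
        = PySem.Dict.mk [("Epistemology", n1 + pvT ["Epistemology", "Formal Epistemology"] specific_dict), ("Formal Methods", n2 + pvT ["Formal Methods", "Logic", "Decision", "Math", "Game", "Statistics", "Set Theory", "Category Theory", "Social Choice", "Critical Thinking"] specific_dict), ("Political", n3 + pvT ["Political", "Law"] specific_dict), ("Western History", n4 + pvT ["Western History", "Ancient", "History of Philosophy", "Modern", "Continental", "Analytic", "Medieval", "Kant", "20th Century", "19th Century", "18th Century", "17th Century", "16th Century", "German", "Pragmatism", "American", "European", "Marx", "French", "Western Philosophy"] specific_dict), ("Non-Western History", n5 + pvT ["Non-Western History", "Asian", "Chinese", "African", "Latin", "Native American", "Indian", "Non-Western", "Arabic", "Japanese"] specific_dict), ("Ethics", n6 + pvT ["Ethics", "Applied Ethics", "Business Ethics", "Metaethics", "Bioethics", "Public Policy", "Value Theory"] specific_dict), ("Language", n7 + pvT ["Language", "Linguistics"] specific_dict), ("Science", n8 + pvT ["Science", "Cognitive", "Physics", "Biology", "Neuro", "Economic"] specific_dict), ("Mind", n9 + pvT ["Mind", "Moral Psych", "Perception", "Psychology", "Phenomenology"] specific_dict), ("Aesthetics", n10 +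 pvT ["Aesthetics"] specific_dict), ("Technology", n11 + pvT ["Technology", "AI", "Data Science"] specific_dict), ("Metaphysics", n12 + pvT ["Metaphysics"] specific_dict), ("Religion", n13 + pvT ["Religion", "Buddhist", "Jewish", "Islam", "Catholic", "Theology"] specific_dict), ("Social", n14 + pvT ["Social", "Race", "Feminist", "Gender"] specific_dict)] := by
  induction specific_dict with
  | nil => intro n1 n2 n3 n4 n5 n6 n7 n8 n9 n10 n11 n12 n13 n14; simp [pvT]
  | cons kv t ih =>
    intro n1 n2 n3 n4 n5 n6 n7 n8 n9 n10 n11 n12 n13 n14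
    obtain ⟨k, v⟩ := kv
    rw [List.foldl_cons, pvStep_eq, ih]
    simp [pvT_cons, Int.add_assoc]

theorem pvT_single_zero (a : String) (d : List (String × Int)) (h : a ∉ d.map Prod.fst) :
    pvT [a] d = 0 := by
  induction d with
  | nil => rfl
  | cons kv t ih =>
    obtain ⟨k, v⟩ := kv
    simp only [List.map_cons, List.mem_cons, not_or] at h
    rw [pvT_cons, if_neg (by simp [Ne.symm h.1]), ih h.2, zero_add]

theorem pvGetD_eq (a : String) (d : List (String × Int)) (hnd : (d.map Prod.fst).Nodup) :
    (PySem.Dict.mk d).getD a 0 = pvT [a] d := by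
  induction d with
  | nil => rfl
  | cons kv t ih =>
    obtain ⟨k, v⟩ := kv
    simp only [List.map_cons, List.nodup_cons] at hnd
    rw [pvT_cons]
    by_cases h : k = a
    · subst h
      rw [if_pos (by simp), pvT_single_zero k t hnd.1, add_zero]
      simp [PySem.Dict.getD, PySem.Dict.get?]
    · rw [if_neg (by simp [h]), zero_add, ← ih hnd.2]
      simp [PySem.Dict.getD, PySem.Dict.get?, h]

theorem pvT_split (a : String) (ms : List String) (d : List (String × Int)) (h : a ∉ ms) :
    pvT (a :: ms) d = pvT [a] d + pvT ms d := by
  induction d with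
  | nil => simp [pvT]
  | cons kv t ih =>
    obtain ⟨k, v⟩ := kv
    rw [pvT_cons, pvT_cons, pvT_cons, ih]
    by_cases hk : k = a
    · subst hk
      simp only [List.mem_cons, true_or, if_true, if_neg h]
      ring
    · by_cases hm : k ∈ ms <;> (simp [List.mem_cons, hk, hm]; try ring)

theorem pvSumGetD (ms : List String) (specific_dict : List (String × Int)) (hms : ms.Nodup)
    (hPre : (specific_dict.map Prod.fst).Nodup) :
    (ms.map (fun area => (PySem.Dict.mk specific_dict).getD area 0)).sum = pvT ms specific_dict := by
  induction ms with
  | nil => simp [pvT]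
  | cons a ms ih =>
    simp only [List.nodup_cons] at hms
    rw [List.map_cons, List.sum_cons, ih hms.2, pvGetD_eq a specific_dict hPre,
      pvT_split a ms specific_dict hms.1]

theorem pvSumGetD_expand (ms : List String) (specific_dict : List (String × Int)) (hms : ms.Nodup)
    (hPre : (specific_dict.map Prod.fst).Nodup) :
    (ms.map (fun area => (PySem.Dict.mk specific_dict).getD area 0)).sum = pvT ms specific_dict :=
  pvSumGetD ms specific_dict hms hPre

-- ===== VERDICT (by name: the statement is the Claim_ definition above) =====
theorem coarse_areas_spec : Claim_equal_coarse_areas := by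
  intro specific_dict _hDom hPre
  unfold Spec_coarse_areas coarse_areas coarse_areas_alt
  have e1 := pvSumGetD_expand ["Epistemology", "Formal Epistemology"] specific_dict (by decide) hPre
  have e2 := pvSumGetD_expand ["Formal Methods", "Logic", "Decision", "Math", "Game", "Statistics", "Set Theory", "Category Theory", "Social Choice", "Critical Thinking"] specific_dict (by decide) hPre
  have e3 := pvSumGetD_expand ["Political", "Law"] specific_dict (by decide) hPre
  have e4 := pvSumGetD_expand ["Western History", "Ancient", "History of Philosophy", "Modern", "Continental", "Analytic", "Medieval", "Kant", "20th Century", "19th Century", "18th Century", "17th Century", "16th Century", "German", "Pragmatism", "American", "European", "Marx", "French", "Western Philosophy"] specific_dict (by decide) hPre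
  have e5 := pvSumGetD_expand ["Non-Western History", "Asian", "Chinese", "African", "Latin", "Native American", "Indian", "Non-Western", "Arabic", "Japanese"] specific_dict (by decide) hPre
  have e6 := pvSumGetD_expand ["Ethics", "Applied Ethics", "Business Ethics", "Metaethics", "Bioethics", "Public Policy", "Value Theory"] specific_dict (by decide) hPre
  have e7 := pvSumGetD_expand ["Language", "Linguistics"] specific_dict (by decide) hPre
  have e8 := pvSumGetD_expand ["Science", "Cognitive", "Physics", "Biology", "Neuro", "Economic"] specific_dict (by decide) hPre
  have e9 := pvSumGetD_expand ["Mind", "Moral Psych", "Perception", "Psychology", "Phenomenology"] specific_dict (by decide) hPre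
  have e10 := pvSumGetD_expand ["Aesthetics"] specific_dict (by decide) hPre
  have e11 := pvSumGetD_expand ["Technology", "AI", "Data Science"] specific_dict (by decide) hPre
  have e12 := pvSumGetD_expand ["Metaphysics"] specific_dict (by decide) hPre
  have e13 := pvSumGetD_expand ["Religion", "Buddhist", "Jewish", "Islam", "Catholic", "Theology"] specific_dict (by decide) hPre
  have e14 := pvSumGetD_expand ["Social", "Race", "Feminist", "Gender"] specific_dict (by decide) hPre
  rw [pvLoop_eq specific_dict 0 0 0 0 0 0 0 0 0 0 0 0 0 0]
  simp only [pvCATEGORIES, List.map_cons, List.map_nil] at e1 e2 e3 e4 e5 e6 e7 e8 e9 e10 e11 e12 e13 e14 ⊢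
  simp [e1, e2, e3, e4, e5, e6, e7, e8, e9, e10, e11, e12, e13, e14]
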